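-- pv_equiv track=rewrite | github.com/JaeHeee/algorithm | 프로그래머스/SummerWinter Coding(~2018)/쿠키구입.py | solution
-- ===== SOURCE A (Python) =====
-- def solution(cookie):
--     answer = 0
--     N = len(cookie) - 1
--     for m in range(0, N):
--         first_idx = m
--         second_idx = m + 1
--         first = cookie[first_idx]
--         second = cookie[second_idx]
--
--         while True:
--             if first == second:
--                 answer = max(first, answer)
--             if first_idx > 0 and first <= second:
--                 first_idx -= 1
--                 first += cookie[first_idx]
--             elif second_idx < N and first >= second:
--                 second_idx += 1
--                 second += cookie[second_idx]
--             else: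
--                 break
--
--     return answer
-- ===== SOURCE B (Python) =====
-- def _best_split(ls, rs):
--     # ls/rs: the cookies on each side of the gap, arranged so that pop()
--     # yields them from the gap outward; returns the best matched sum, or None.
--     f = ls.pop()
--     s = rs.pop()
--     found = None
--     while True:
--         if f == s and (found is None or f > found):
--             found = f
--         if ls and f <= s:
--             f += ls.pop()
--         elif rs and f >= s:
--             s += rs.pop()
--         else:
--             return found
--
--
-- def solution(cookie):
--     best = 0
--     n = len(cookie)
--     for m in range(n - 1):
--         v = _best_split(cookie[:m + 1], cookie[:m:-1])
--         if v is not None and v > best: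
--             best = v
--     return best
-- ===== Notes on version B (the rewrite author's own statement) =====
-- stated objective: alternative
-- what changed: B materialises the two sides of each split as explicit stacks consumed with pop() and computes each split's best matched sum in an Option-returning helper combined into the answer afterwards, instead of A's inline walk over absolute indices into the original list with bounds tests and a global running max.
import Mathlib
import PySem

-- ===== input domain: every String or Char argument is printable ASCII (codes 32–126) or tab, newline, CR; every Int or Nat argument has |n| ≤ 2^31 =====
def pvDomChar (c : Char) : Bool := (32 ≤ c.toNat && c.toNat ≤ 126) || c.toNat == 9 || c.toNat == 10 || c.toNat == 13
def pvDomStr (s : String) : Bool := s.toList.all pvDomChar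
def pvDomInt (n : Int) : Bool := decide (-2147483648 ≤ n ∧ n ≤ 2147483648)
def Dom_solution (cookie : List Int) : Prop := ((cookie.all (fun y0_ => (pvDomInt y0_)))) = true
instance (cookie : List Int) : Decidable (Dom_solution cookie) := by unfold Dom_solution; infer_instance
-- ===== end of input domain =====

-- B re-decomposes A's per-split walk: explicit outward stacks and an Option-valued helper instead of
-- absolute-index pointers with a global running max; same asymptotic cost ("alternative", not faster).

-- ===== PORT A =====
-- the 'while True' loop of A: first_idx = a, second_idx = b, first = f, second = s
def solutionWalk (cookie : List Int) (N a b f s ans : Int) : Int :=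
  let ans' := if f = s then max f ans else ans
  if _h1 : 0 < a ∧ f ≤ s then
    solutionWalk cookie N (a - 1) b (f + PySem.List.pyGetD cookie (a - 1) 0) s ans'
  else if _h2 : b < N ∧ s ≤ f then
    solutionWalk cookie N a (b + 1) f (s + PySem.List.pyGetD cookie (b + 1) 0) ans'
  else ans'
termination_by (a.toNat + (N - b).toNat)
decreasing_by
  · omega
  · omega

def solution (cookie : List Int) : Int :=
  let N : Int := (cookie.length : Int) - 1
  (PySem.List.pyRange 0 N 1).foldl
    (fun ans m =>
      solutionWalk cookie N m (m + 1)
        (PySem.List.pyGetD cookie m 0) (PySem.List.pyGetD cookie (m + 1) 0) ans) 0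

-- ===== PORT B =====
-- the 'while True' loop of _best_split, after the two initial pops; the Python stacks pop() from
-- their END, so each is represented with its top (the next element pop() returns) at the HEAD
def walkB (ls rs : List Int) (f s : Int) (found : Option Int) : Option Int :=
  let found' :=
    match found with
    | none => if f = s then some f else none
    | some v => if f = s ∧ v < f then some f else some v
  if h1 : ls ≠ [] ∧ f ≤ s then
    walkB ls.tail rs (f + ls.head h1.1) s found'
  else if h2 : rs ≠ [] ∧ s ≤ f then
    walkB ls rs.tail f (s + rs.head h2.1) found'
  else found'
termination_by ls.length + rs.length
decreasing_by
  · have := List.length_pos_iff.mpr h1.1; simp [List.length_tail]; omega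
  · have := List.length_pos_iff.mpr h2.1; simp [List.length_tail]; omega

-- _best_split: pops the two starting cookies, then walks (the stacks are nonempty at every call site)
def bestSplit (ls rs : List Int) : Option Int :=
  match ls, rs with
  | f :: ls, s :: rs => walkB ls rs f s none
  | _, _ => none

def solution_alt (cookie : List Int) : Int :=
  let n := cookie.length
  (PySem.List.pyRange 0 ((n : Int) - 1) 1).foldl
    (fun best m =>
      -- cookie[:m+1] and cookie[:m:-1] as top-first stacks
      match bestSplit ((cookie.take (m.toNat + 1)).reverse) (cookie.drop (m.toNat + 1)) with
      | some v => if best < v then v else best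
      | none => best) 0

-- ===== PRECONDITION & SPEC =====
def Spec_solution (cookie : List Int) (out : Int) : Prop := out = solution_alt cookie
instance (cookie : List Int) (out : Int) : Decidable (Spec_solution cookie out) := by unfold Spec_solution; infer_instance

-- ===== CLAIM (what is proved, stated in full; the proofs are below) =====
def Claim_equal_solution : Prop := ∀ (cookie : List Int), Dom_solution cookie → Spec_solution cookie (solution cookie)

-- ===== LEMMAS AND PROOFS =====
-- fold A's 'answer' and B's 'found' into one value: what the surrounding code does with the walk's result
def resolveMax (ans : Int) (o : Option Int) : Int :=
  match o with
  | some w => max w ans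
  | none => ans
-- starting from a recorded value, B's walk returns a recorded value at least as large
theorem walkB_mono (ls rs : List Int) (f s : Int) (found : Option Int) :
    ∀ v : Int, found = some v → ∃ w, v ≤ w ∧ walkB ls rs f s found = some w := by
  intro v hv
  subst hv
  rw [walkB.eq_def]
  dsimp only
  by_cases hc : f = s ∧ v < f
  · rw [if_pos hc]
    by_cases h1 : ls ≠ [] ∧ f ≤ s
    · rw [dif_pos h1]
      obtain ⟨w, hw, he⟩ := walkB_mono ls.tail rs (f + ls.head h1.1) s (some f) f rfl
      exact ⟨w, by omega, he⟩
    · rw [dif_neg h1]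
      by_cases h2 : rs ≠ [] ∧ s ≤ f
      · rw [dif_pos h2]
        obtain ⟨w, hw, he⟩ := walkB_mono ls rs.tail f (s + rs.head h2.1) (some f) f rfl
        exact ⟨w, by omega, he⟩
      · rw [dif_neg h2]
        exact ⟨f, le_of_lt hc.2, rfl⟩
  · rw [if_neg hc]
    by_cases h1 : ls ≠ [] ∧ f ≤ s
    · rw [dif_pos h1]
      exact walkB_mono ls.tail rs (f + ls.head h1.1) s (some v) v rfl
    · rw [dif_neg h1]
      by_cases h2 : rs ≠ [] ∧ s ≤ f
      · rw [dif_pos h2]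
        exact walkB_mono ls rs.tail f (s + rs.head h2.1) (some v) v rfl
      · rw [dif_neg h2]
        exact ⟨v, le_refl v, rfl⟩
termination_by ls.length + rs.length
decreasing_by
  all_goals first
    | (have := List.length_pos_iff.mpr h1.1; simp [List.length_tail]; omega)
    | (have := List.length_pos_iff.mpr h2.1; simp [List.length_tail]; omega)
-- the max-absorption used when A has already folded the newly recorded value into 'answer'
theorem resolve_abs (ans f w : Int) (hfw : f ≤ w) : max w (max f ans) = max w ans := by
  rw [← max_assoc, max_eq_left hfw]
-- pushing A's 'answer := max(first, answer)' through the rest of B's walk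
theorem resolve_step (ls rs : List Int) (f' s' f ans u : Int) (hfu : f ≤ u) :
    resolveMax (max f ans) (walkB ls rs f' s' (some u)) = resolveMax ans (walkB ls rs f' s' (some u)) := by
  obtain ⟨w, hw, he⟩ := walkB_mono ls rs f' s' (some u) u rfl
  rw [he]
  exact resolve_abs ans f w (le_trans hfu hw)
-- peeling the innermost remaining cookie off the left stack
theorem take_rev_cons (xs : List Int) (k : Nat) (hk : k < xs.length) :
    (xs.take (k + 1)).reverse = xs[k] :: (xs.take k).reverse := by
  rw [List.take_add_one, List.getElem?_eq_getElem hk]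
  simp
-- A's walk simulates B's walk on the outward stacks: the stacks hold exactly the cookies A's
-- absolute indices have not yet consumed, and 'found' is a recorded value already folded into 'answer'
theorem walk_sim (cookie : List Int) (N : Int) (hN : N = (cookie.length : Int) - 1)
    (a b f s ans : Int) (found : Option Int)
    (ha0 : 0 ≤ a) (haL : a ≤ (cookie.length : Int)) (hb0 : 0 ≤ b)
    (hfound : found = none ∨ ∃ v, found = some v ∧ v ≤ ans) :
    solutionWalk cookie N a b f s ans =
      resolveMax ans (walkB ((cookie.take a.toNat).reverse) (cookie.drop (b.toNat + 1)) f s found) := by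
  have hLne : ((cookie.take a.toNat).reverse ≠ []) ↔ 0 < a := by
    rw [ne_eq, List.reverse_eq_nil_iff, List.take_eq_nil_iff]
    constructor
    · intro h
      have h1 := (not_or.mp h).1
      omega
    · intro h
      rw [not_or]
      refine ⟨by omega, ?_⟩
      intro e
      subst e
      simp at haL
      omega
  have hRne : (cookie.drop (b.toNat + 1) ≠ []) ↔ b < N := by
    rw [ne_eq, List.drop_eq_nil_iff, not_le]
    omega
  rw [solutionWalk.eq_def, walkB.eq_def]
  rcases hfound with hf | ⟨v0, hf, hv0⟩ <;> subst hf <;> dsimp only <;> by_cases hfs : f = s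
  -- found = none, f = s : found' = some f, answer' = max f ans
  · rw [if_pos hfs, if_pos hfs]
    by_cases h1 : 0 < a ∧ f ≤ s
    · rw [dif_pos h1, dif_pos ⟨hLne.mpr h1.1, h1.2⟩]
      have hia : a.toNat - 1 < cookie.length := by omega
      have htk := take_rev_cons cookie (a.toNat - 1) hia
      have hae : a.toNat - 1 + 1 = a.toNat := by omega
      rw [hae] at htk
      have hg : PySem.List.pyGetD cookie (a - 1) 0 = cookie[a.toNat - 1] := by
        rw [PySem.List.pyGetD_eq_getElem cookie 0 (by omega) (by omega)]
        congr 1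
        omega
      have hrec := walk_sim cookie N hN (a - 1) b (f + PySem.List.pyGetD cookie (a - 1) 0) s
        (max f ans) (some f) (by omega) (by omega) hb0 (Or.inr ⟨f, rfl, le_max_left f ans⟩)
      have hat : (a - 1).toNat = a.toNat - 1 := by omega
      rw [hat] at hrec
      rw [hrec]
      simp only [htk, List.head_cons, List.tail_cons, hg]
      exact resolve_step _ _ _ _ f ans f (le_refl f)
    · rw [dif_neg h1, dif_neg (show ¬((cookie.take a.toNat).reverse ≠ [] ∧ f ≤ s) from fun hc => h1 ⟨hLne.mp hc.1, hc.2⟩)]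
      by_cases h2 : b < N ∧ s ≤ f
      · rw [dif_pos h2, dif_pos ⟨hRne.mpr h2.1, h2.2⟩]
        have hib : b.toNat + 1 < cookie.length := by omega
        have hdr : (cookie.drop (b.toNat + 1)).tail = cookie.drop (b.toNat + 1 + 1) := List.tail_drop
        have hhd : (cookie.drop (b.toNat + 1)).head (hRne.mpr h2.1) = cookie[b.toNat + 1] := by
          rw [List.head_eq_getElem]
          simp
        have hg : PySem.List.pyGetD cookie (b + 1) 0 = cookie[b.toNat + 1] := by
          rw [PySem.List.pyGetD_eq_getElem cookie 0 (by omega) (by omega)]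
          congr 1
          omega
        have hrec := walk_sim cookie N hN a (b + 1) f (s + PySem.List.pyGetD cookie (b + 1) 0)
          (max f ans) (some f) ha0 haL (by omega) (Or.inr ⟨f, rfl, le_max_left f ans⟩)
        have hbt : (b + 1).toNat + 1 = b.toNat + 1 + 1 := by omega
        rw [hbt] at hrec
        rw [hrec]
        simp only [hdr, hhd, hg]
        exact resolve_step _ _ _ _ f ans f (le_refl f)
      · rw [dif_neg h2, dif_neg (show ¬(cookie.drop (b.toNat + 1) ≠ [] ∧ s ≤ f) from fun hc => h2 ⟨hRne.mp hc.1, hc.2⟩)]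
        simp [resolveMax]
  -- found = none, f ≠ s : nothing recorded on either side
  · rw [if_neg hfs, if_neg hfs]
    by_cases h1 : 0 < a ∧ f ≤ s
    · rw [dif_pos h1, dif_pos ⟨hLne.mpr h1.1, h1.2⟩]
      have hia : a.toNat - 1 < cookie.length := by omega
      have htk := take_rev_cons cookie (a.toNat - 1) hia
      have hae : a.toNat - 1 + 1 = a.toNat := by omega
      rw [hae] at htk
      have hg : PySem.List.pyGetD cookie (a - 1) 0 = cookie[a.toNat - 1] := by
        rw [PySem.List.pyGetD_eq_getElem cookie 0 (by omega) (by omega)]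
        congr 1
        omega
      have hrec := walk_sim cookie N hN (a - 1) b (f + PySem.List.pyGetD cookie (a - 1) 0) s
        ans none (by omega) (by omega) hb0 (Or.inl rfl)
      have hat : (a - 1).toNat = a.toNat - 1 := by omega
      rw [hat] at hrec
      rw [hrec]
      simp only [htk, List.head_cons, List.tail_cons, hg]
    · rw [dif_neg h1, dif_neg (show ¬((cookie.take a.toNat).reverse ≠ [] ∧ f ≤ s) from fun hc => h1 ⟨hLne.mp hc.1, hc.2⟩)]
      by_cases h2 : b < N ∧ s ≤ f
      · rw [dif_pos h2, dif_pos ⟨hRne.mpr h2.1, h2.2⟩]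
        have hib : b.toNat + 1 < cookie.length := by omega
        have hdr : (cookie.drop (b.toNat + 1)).tail = cookie.drop (b.toNat + 1 + 1) := List.tail_drop
        have hhd : (cookie.drop (b.toNat + 1)).head (hRne.mpr h2.1) = cookie[b.toNat + 1] := by
          rw [List.head_eq_getElem]
          simp
        have hg : PySem.List.pyGetD cookie (b + 1) 0 = cookie[b.toNat + 1] := by
          rw [PySem.List.pyGetD_eq_getElem cookie 0 (by omega) (by omega)]
          congr 1
          omega
        have hrec := walk_sim cookie N hN a (b + 1) f (s + PySem.List.pyGetD cookie (b + 1) 0)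
          ans none ha0 haL (by omega) (Or.inl rfl)
        have hbt : (b + 1).toNat + 1 = b.toNat + 1 + 1 := by omega
        rw [hbt] at hrec
        rw [hrec]
        simp only [hdr, hhd, hg]
      · rw [dif_neg h2, dif_neg (show ¬(cookie.drop (b.toNat + 1) ≠ [] ∧ s ≤ f) from fun hc => h2 ⟨hRne.mp hc.1, hc.2⟩)]
        rfl
  -- found = some v0 with v0 ≤ ans, f = s
  · by_cases hvf : v0 < f
    · rw [if_pos hfs, if_pos ⟨hfs, hvf⟩]
      by_cases h1 : 0 < a ∧ f ≤ s
      · rw [dif_pos h1, dif_pos ⟨hLne.mpr h1.1, h1.2⟩]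
        have hia : a.toNat - 1 < cookie.length := by omega
        have htk := take_rev_cons cookie (a.toNat - 1) hia
        have hae : a.toNat - 1 + 1 = a.toNat := by omega
        rw [hae] at htk
        have hg : PySem.List.pyGetD cookie (a - 1) 0 = cookie[a.toNat - 1] := by
          rw [PySem.List.pyGetD_eq_getElem cookie 0 (by omega) (by omega)]
          congr 1
          omega
        have hrec := walk_sim cookie N hN (a - 1) b (f + PySem.List.pyGetD cookie (a - 1) 0) s
          (max f ans) (some f) (by omega) (by omega) hb0 (Or.inr ⟨f, rfl, le_max_left f ans⟩)
        have hat : (a - 1).toNat = a.toNat - 1 := by omega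
        rw [hat] at hrec
        rw [hrec]
        simp only [htk, List.head_cons, List.tail_cons, hg]
        exact resolve_step _ _ _ _ f ans f (le_refl f)
      · rw [dif_neg h1, dif_neg (show ¬((cookie.take a.toNat).reverse ≠ [] ∧ f ≤ s) from fun hc => h1 ⟨hLne.mp hc.1, hc.2⟩)]
        by_cases h2 : b < N ∧ s ≤ f
        · rw [dif_pos h2, dif_pos ⟨hRne.mpr h2.1, h2.2⟩]
          have hib : b.toNat + 1 < cookie.length := by omega
          have hdr : (cookie.drop (b.toNat + 1)).tail = cookie.drop (b.toNat + 1 + 1) := List.tail_drop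
          have hhd : (cookie.drop (b.toNat + 1)).head (hRne.mpr h2.1) = cookie[b.toNat + 1] := by
            rw [List.head_eq_getElem]
            simp
          have hg : PySem.List.pyGetD cookie (b + 1) 0 = cookie[b.toNat + 1] := by
            rw [PySem.List.pyGetD_eq_getElem cookie 0 (by omega) (by omega)]
            congr 1
            omega
          have hrec := walk_sim cookie N hN a (b + 1) f (s + PySem.List.pyGetD cookie (b + 1) 0)
            (max f ans) (some f) ha0 haL (by omega) (Or.inr ⟨f, rfl, le_max_left f ans⟩)
          have hbt : (b + 1).toNat + 1 = b.toNat + 1 + 1 := by omega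
          rw [hbt] at hrec
          rw [hrec]
          simp only [hdr, hhd, hg]
          exact resolve_step _ _ _ _ f ans f (le_refl f)
        · rw [dif_neg h2, dif_neg (show ¬(cookie.drop (b.toNat + 1) ≠ [] ∧ s ≤ f) from fun hc => h2 ⟨hRne.mp hc.1, hc.2⟩)]
          simp [resolveMax]
    · -- f ≤ v0 ≤ ans: the recorded value changes nothing on either side
      have hfa : max f ans = ans := max_eq_right (by omega)
      rw [if_pos hfs, if_neg (show ¬(f = s ∧ v0 < f) from fun hc => hvf hc.2), hfa]
      by_cases h1 : 0 < a ∧ f ≤ s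
      · rw [dif_pos h1, dif_pos ⟨hLne.mpr h1.1, h1.2⟩]
        have hia : a.toNat - 1 < cookie.length := by omega
        have htk := take_rev_cons cookie (a.toNat - 1) hia
        have hae : a.toNat - 1 + 1 = a.toNat := by omega
        rw [hae] at htk
        have hg : PySem.List.pyGetD cookie (a - 1) 0 = cookie[a.toNat - 1] := by
          rw [PySem.List.pyGetD_eq_getElem cookie 0 (by omega) (by omega)]
          congr 1
          omega
        have hrec := walk_sim cookie N hN (a - 1) b (f + PySem.List.pyGetD cookie (a - 1) 0) s
          ans (some v0) (by omega) (by omega) hb0 (Or.inr ⟨v0, rfl, hv0⟩)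
        have hat : (a - 1).toNat = a.toNat - 1 := by omega
        rw [hat] at hrec
        rw [hrec]
        simp only [htk, List.head_cons, List.tail_cons, hg]
      · rw [dif_neg h1, dif_neg (show ¬((cookie.take a.toNat).reverse ≠ [] ∧ f ≤ s) from fun hc => h1 ⟨hLne.mp hc.1, hc.2⟩)]
        by_cases h2 : b < N ∧ s ≤ f
        · rw [dif_pos h2, dif_pos ⟨hRne.mpr h2.1, h2.2⟩]
          have hib : b.toNat + 1 < cookie.length := by omega
          have hdr : (cookie.drop (b.toNat + 1)).tail = cookie.drop (b.toNat + 1 + 1) := List.tail_drop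
          have hhd : (cookie.drop (b.toNat + 1)).head (hRne.mpr h2.1) = cookie[b.toNat + 1] := by
            rw [List.head_eq_getElem]
            simp
          have hg : PySem.List.pyGetD cookie (b + 1) 0 = cookie[b.toNat + 1] := by
            rw [PySem.List.pyGetD_eq_getElem cookie 0 (by omega) (by omega)]
            congr 1
            omega
          have hrec := walk_sim cookie N hN a (b + 1) f (s + PySem.List.pyGetD cookie (b + 1) 0)
            ans (some v0) ha0 haL (by omega) (Or.inr ⟨v0, rfl, hv0⟩)
          have hbt : (b + 1).toNat + 1 = b.toNat + 1 + 1 := by omega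
          rw [hbt] at hrec
          rw [hrec]
          simp only [hdr, hhd, hg]
        · rw [dif_neg h2, dif_neg (show ¬(cookie.drop (b.toNat + 1) ≠ [] ∧ s ≤ f) from fun hc => h2 ⟨hRne.mp hc.1, hc.2⟩)]
          simpa [resolveMax] using hv0
  -- found = some v0 with v0 ≤ ans, f ≠ s
  · rw [if_neg hfs, if_neg (show ¬(f = s ∧ v0 < f) from fun hc => hfs hc.1)]
    by_cases h1 : 0 < a ∧ f ≤ s
    · rw [dif_pos h1, dif_pos ⟨hLne.mpr h1.1, h1.2⟩]
      have hia : a.toNat - 1 < cookie.length := by omega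
      have htk := take_rev_cons cookie (a.toNat - 1) hia
      have hae : a.toNat - 1 + 1 = a.toNat := by omega
      rw [hae] at htk
      have hg : PySem.List.pyGetD cookie (a - 1) 0 = cookie[a.toNat - 1] := by
        rw [PySem.List.pyGetD_eq_getElem cookie 0 (by omega) (by omega)]
        congr 1
        omega
      have hrec := walk_sim cookie N hN (a - 1) b (f + PySem.List.pyGetD cookie (a - 1) 0) s
        ans (some v0) (by omega) (by omega) hb0 (Or.inr ⟨v0, rfl, hv0⟩)
      have hat : (a - 1).toNat = a.toNat - 1 := by omega
      rw [hat] at hrec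
      rw [hrec]
      simp only [htk, List.head_cons, List.tail_cons, hg]
    · rw [dif_neg h1, dif_neg (show ¬((cookie.take a.toNat).reverse ≠ [] ∧ f ≤ s) from fun hc => h1 ⟨hLne.mp hc.1, hc.2⟩)]
      by_cases h2 : b < N ∧ s ≤ f
      · rw [dif_pos h2, dif_pos ⟨hRne.mpr h2.1, h2.2⟩]
        have hib : b.toNat + 1 < cookie.length := by omega
        have hdr : (cookie.drop (b.toNat + 1)).tail = cookie.drop (b.toNat + 1 + 1) := List.tail_drop
        have hhd : (cookie.drop (b.toNat + 1)).head (hRne.mpr h2.1) = cookie[b.toNat + 1] := by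
          rw [List.head_eq_getElem]
          simp
        have hg : PySem.List.pyGetD cookie (b + 1) 0 = cookie[b.toNat + 1] := by
          rw [PySem.List.pyGetD_eq_getElem cookie 0 (by omega) (by omega)]
          congr 1
          omega
        have hrec := walk_sim cookie N hN a (b + 1) f (s + PySem.List.pyGetD cookie (b + 1) 0)
          ans (some v0) ha0 haL (by omega) (Or.inr ⟨v0, rfl, hv0⟩)
        have hbt : (b + 1).toNat + 1 = b.toNat + 1 + 1 := by omega
        rw [hbt] at hrec
        rw [hrec]
        simp only [hdr, hhd, hg]
      · rw [dif_neg h2, dif_neg (show ¬(cookie.drop (b.toNat + 1) ≠ [] ∧ s ≤ f) from fun hc => h2 ⟨hRne.mp hc.1, hc.2⟩)]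
        simpa [resolveMax] using hv0
termination_by (a.toNat + (N - b).toNat)
decreasing_by all_goals omega
-- ===== VERDICT (by name: the statement is the Claim_ definition above) =====
theorem solution_spec : Claim_equal_solution := by
  unfold Claim_equal_solution Spec_solution
  intro cookie _
  unfold solution solution_alt
  refine PySem.List.foldl_congr_mem _ _ _ _ ?_
  intro ans m hm
  rw [PySem.List.mem_pyRange_one] at hm
  have hm0 : 0 ≤ m := hm.1
  have hmN : m < (cookie.length : Int) - 1 := hm.2
  have h1 : m.toNat < cookie.length := by omega
  have h2 : m.toNat + 1 < cookie.length := by omega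
  have htk := take_rev_cons cookie m.toNat h1
  have hdr : cookie.drop (m.toNat + 1) = cookie[m.toNat + 1] :: cookie.drop (m.toNat + 1 + 1) :=
    List.drop_eq_getElem_cons h2
  have hga : PySem.List.pyGetD cookie m 0 = cookie[m.toNat] := by
    rw [PySem.List.pyGetD_eq_getElem cookie 0 (by omega) (by omega)]
  have hgb : PySem.List.pyGetD cookie (m + 1) 0 = cookie[m.toNat + 1] := by
    rw [PySem.List.pyGetD_eq_getElem cookie 0 (by omega) (by omega)]
    congr 1
    omega
  have hsim := walk_sim cookie ((cookie.length : Int) - 1) rfl m (m + 1)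
    (PySem.List.pyGetD cookie m 0) (PySem.List.pyGetD cookie (m + 1) 0) ans none
    hm0 (by omega) (by omega) (Or.inl rfl)
  have hbt : (m + 1).toNat + 1 = m.toNat + 1 + 1 := by omega
  rw [hbt] at hsim
  rw [hsim]
  unfold bestSplit
  rw [htk, hdr]
  simp only [hga, hgb]
  rcases he : walkB ((cookie.take m.toNat).reverse) (cookie.drop (m.toNat + 1 + 1))
      cookie[m.toNat] cookie[m.toNat + 1] none with _ | v
  · rfl
  · show max v ans = if ans < v then v else ans
    rcases le_or_gt v ans with h | h
    · rw [max_eq_right h, if_neg (by omega)]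
    · rw [max_eq_left (by omega), if_pos h]
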